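-- pv_equiv track=rewrite | github.com/nickdbush/logbookassistant | scripts/lib/vin.py | vin_in_range
-- ===== SOURCE A (Python) =====
-- def vin_in_range(vin: str, sn_min: str | None, sn_max: str | None) -> bool:
--     """Check if VIN falls within a serial number range (wildcard-aware).
--
--     Uses sn_min's '*' positions as the mask. At non-wildcard positions,
--     checks vin >= sn_min and vin <= sn_max lexicographically.
--     NULL/empty min means indeterminate → True. NULL/empty max → open-ended.
--     """
--     if not sn_min or sn_min.upper() == "NULL":
--         return True
--
--     # Clean trailing ' -' from min values (seen in TechnicalType data)
--     sn_min = sn_min.rstrip().rstrip("-").rstrip()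
--
--     if len(vin) != len(sn_min):
--         return True  # indeterminate
--
--     # Build wildcard mask from sn_min
--     mask = [c != "*" for c in sn_min]
--
--     masked_vin = "".join(vin[i] for i in range(len(vin)) if mask[i])
--     masked_min = "".join(sn_min[i] for i in range(len(sn_min)) if mask[i])
--
--     if masked_vin < masked_min:
--         return False
--
--     if not sn_max or sn_max.upper() == "NULL" or sn_max == "":
--         return True  # open-ended
--
--     if len(vin) != len(sn_max):
--         return True
--
--     masked_max = "".join(sn_max[i] for i in range(len(sn_max)) if i < len(mask) and mask[i])
--     return masked_vin <= masked_max
-- ===== SOURCE B (Python) =====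
-- def vin_in_range(vin: str, sn_min: str | None, sn_max: str | None) -> bool:
--     """Same checks as A, but via a single positional first-difference scan
--     per bound instead of building masked strings and comparing them."""
--     if not sn_min or sn_min.upper() == "NULL":
--         return True
--
--     sn_min = sn_min.rstrip().rstrip("-").rstrip()
--
--     if len(vin) != len(sn_min):
--         return True
--
--     # Lower bound: first kept (non-'*') position where vin differs decides.
--     for i in range(len(vin)):
--         m = sn_min[i]
--         if m == "*" or vin[i] == m:
--             continue
--         if vin[i] < m:
--             return False
--         break  # vin > sn_min at first difference: lower bound satisfied
--
--     if not sn_max or sn_max.upper() == "NULL":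
--         return True
--
--     if len(vin) != len(sn_max):
--         return True
--
--     # Upper bound: analogous first-difference scan against sn_max.
--     for i in range(len(vin)):
--         if sn_min[i] == "*" or vin[i] == sn_max[i]:
--             continue
--         return vin[i] < sn_max[i]
--     return True
-- ===== Notes on version B (the rewrite author's own statement) =====
-- stated objective: alternative
-- what changed: Replaces the three join-comprehension masked strings and lexicographic string comparisons with per-bound first-difference positional scans that skip '*' positions and exit at the first differing kept character, allocating no intermediate strings.
import Mathlib
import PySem

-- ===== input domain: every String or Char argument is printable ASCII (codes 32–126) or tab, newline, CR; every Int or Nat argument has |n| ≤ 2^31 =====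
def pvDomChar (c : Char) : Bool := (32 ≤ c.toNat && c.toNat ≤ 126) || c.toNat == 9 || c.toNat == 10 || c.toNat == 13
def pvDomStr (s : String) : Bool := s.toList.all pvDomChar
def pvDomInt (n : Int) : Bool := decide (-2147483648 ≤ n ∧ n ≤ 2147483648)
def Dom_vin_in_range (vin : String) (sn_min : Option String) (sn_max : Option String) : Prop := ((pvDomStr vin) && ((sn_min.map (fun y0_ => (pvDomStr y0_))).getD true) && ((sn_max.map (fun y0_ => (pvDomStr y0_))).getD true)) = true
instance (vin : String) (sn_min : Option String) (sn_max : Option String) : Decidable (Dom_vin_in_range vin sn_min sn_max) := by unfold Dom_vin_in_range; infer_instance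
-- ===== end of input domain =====

-- B replaces A's three join-built masked strings + lexicographic string comparisons by
-- per-bound first-difference positional scans (skipping '*' positions); same results, no intermediate strings.


-- ===== PORT A =====
-- exact port of s.rstrip("-") on List Char: drop trailing '-' characters
def pvRstripDash (cs : List Char) : List Char := (cs.reverse.dropWhile (fun c => c == '-')).reverse

-- "".join(s[i] for i in range(len(s)) if mask[i])  (every index used is in range)
def pvMaskedJoin (s : List Char) (mask : List Bool) : List Char :=
  (List.range s.length).foldl (fun acc i => if mask.getD i false then acc ++ [s.getD i ' '] else acc) []

-- "".join(s[i] for i in range(len(s)) if i < len(mask) and mask[i])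
def pvMaskedJoinG (s : List Char) (mask : List Bool) : List Char :=
  (List.range s.length).foldl
    (fun acc i => if decide (i < mask.length) && mask.getD i false then acc ++ [s.getD i ' '] else acc) []

def vin_in_range (vin : String) (sn_min : Option String) (sn_max : Option String) : Bool :=
  match sn_min with
  | none => true
  | some s0 =>
    if s0 = "" || PySem.Str.upper s0 = "NULL" then true
    else
      let smin := PySem.Chars.rstrip (pvRstripDash (PySem.Chars.rstrip s0.toList))
      let v := vin.toList
      if v.length ≠ smin.length then true
      else
        let mask := smin.map (fun c => c != '*')
        let masked_vin := pvMaskedJoin v mask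
        let masked_min := pvMaskedJoin smin mask
        if decide (masked_vin < masked_min) then false
        else
          match sn_max with
          | none => true
          | some t0 =>
            if t0 = "" || PySem.Str.upper t0 = "NULL" || t0 = "" then true
            else
              let smax := t0.toList
              if v.length ≠ smax.length then true
              else
                let masked_max := pvMaskedJoinG smax mask
                decide (masked_vin ≤ masked_max)

-- ===== PORT B =====
-- lower-bound loop: the first kept (non-'*') position where vin differs from sn_min decides
def pvScanLower : List Char → List Char → Bool
  | a :: v, m :: sm =>
      if m == '*' || a == m then pvScanLower v sm
      else if a < m then false
      else true
  | _, _ => true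

-- upper-bound loop: the first kept position where vin differs from sn_max decides
def pvScanUpper : List Char → List Char → List Char → Bool
  | a :: v, m :: sm, c :: mx =>
      if m == '*' || a == c then pvScanUpper v sm mx
      else decide (a < c)
  | _, _, _ => true

def vin_in_range_alt (vin : String) (sn_min : Option String) (sn_max : Option String) : Bool :=
  match sn_min with
  | none => true
  | some s0 =>
    if s0 = "" || PySem.Str.upper s0 = "NULL" then true
    else
      let smin := PySem.Chars.rstrip (pvRstripDash (PySem.Chars.rstrip s0.toList))
      let v := vin.toList
      if v.length ≠ smin.length then true
      else
        if pvScanLower v smin = false then false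
        else
          match sn_max with
          | none => true
          | some t0 =>
            if t0 = "" || PySem.Str.upper t0 = "NULL" then true
            else
              let smax := t0.toList
              if v.length ≠ smax.length then true
              else pvScanUpper v smin smax

-- ===== PRECONDITION & SPEC =====
def Spec_vin_in_range (vin : String) (sn_min : Option String) (sn_max : Option String) (out : Bool) : Prop := out = vin_in_range_alt vin sn_min sn_max
instance (vin : String) (sn_min : Option String) (sn_max : Option String) (out : Bool) : Decidable (Spec_vin_in_range vin sn_min sn_max out) := by unfold Spec_vin_in_range; infer_instance

-- ===== CLAIM (what is proved, stated in full; the proofs are below) =====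
def Claim_equal_vin_in_range : Prop := ∀ (vin : String) (sn_min : Option String) (sn_max : Option String), Dom_vin_in_range vin sn_min sn_max → Spec_vin_in_range vin sn_min sn_max (vin_in_range vin sn_min sn_max)

-- ===== LEMMAS AND PROOFS =====
-- the kept characters of s at the non-'*' positions of sm
def pvSel : List Char → List Char → List Char
  | a :: v, m :: sm => if m ≠ '*' then a :: pvSel v sm else pvSel v sm
  | _, _ => []

theorem pvFilterMap_eq_sel (s sm : List Char) (h : s.length = sm.length) :
    ((List.range s.length).filter (fun i => (sm.map (fun c => c != '*')).getD i false)).map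
      (fun i => s.getD i ' ') = pvSel s sm := by
  induction s generalizing sm with
  | nil => simp [pvSel]
  | cons a v ih =>
    cases sm with
    | nil => simp at h
    | cons m sm =>
      simp only [List.length_cons, Nat.add_right_cancel_iff] at h
      rw [show (a :: v).length = v.length + 1 from rfl, List.range_succ_eq_map]
      simp only [List.filter_cons, List.filter_map]
      by_cases hm : m = '*'
      · simp [pvSel, hm, Function.comp_def, ← ih _ h]
      · simp [pvSel, hm, Function.comp_def, ← ih _ h]

theorem pvMaskedJoin_eq_sel (s sm : List Char) (h : s.length = sm.length) :
    pvMaskedJoin s (sm.map (fun c => c != '*')) = pvSel s sm := by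
  unfold pvMaskedJoin
  rw [PySem.List.foldl_append_if]
  simpa using pvFilterMap_eq_sel s sm h

theorem pvMaskedJoinG_eq (s : List Char) (mask : List Bool) (h : s.length = mask.length) :
    pvMaskedJoinG s mask = pvMaskedJoin s mask := by
  unfold pvMaskedJoinG pvMaskedJoin
  rw [PySem.List.foldl_append_if, PySem.List.foldl_append_if]
  congr 1
  congr 1
  apply List.filter_congr
  intro i hi
  simp only [List.mem_range] at hi
  simp [h ▸ hi]

theorem pvScanLower_eq (v sm : List Char) (h : v.length = sm.length) :
    pvScanLower v sm = !decide (pvSel v sm < pvSel sm sm) := by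
  induction v generalizing sm with
  | nil => cases sm with
    | nil => simp [pvScanLower, pvSel]
    | cons m sm => simp at h
  | cons a v ih => cases sm with
    | nil => simp at h
    | cons m sm =>
      simp only [List.length_cons, Nat.add_right_cancel_iff] at h
      by_cases hm : m = '*'
      · simp [pvScanLower, pvSel, hm, ih _ h]
      · by_cases ham : a = m
        · simp [pvScanLower, pvSel, hm, ham, ih _ h]
        · by_cases hlt : a < m
          · simp [pvScanLower, pvSel, hm, ham, hlt, List.cons_lt_cons_iff]
          · simp [pvScanLower, pvSel, hm, ham, hlt, List.cons_lt_cons_iff]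

theorem pvConsLeConsIff (a b : Char) (x y : List Char) :
    (a :: x ≤ b :: y) ↔ (a < b ∨ a = b ∧ x ≤ y) := by
  rw [← Std.not_lt, List.cons_lt_cons_iff]
  push Not
  constructor
  · intro h
    rcases lt_trichotomy a b with h1|h1|h1
    · exact Or.inl h1
    · exact Or.inr ⟨h1, h.2 h1.symm⟩
    · exact absurd h.1 (by simpa using h1)
  · rintro (h1|⟨rfl,h2⟩)
    · exact ⟨le_of_lt h1, fun e => absurd h1 (by simp [e])⟩
    · exact ⟨le_refl _, fun _ => h2⟩

theorem pvScanUpper_eq (v sm mx : List Char) (h1 : v.length = sm.length) (h2 : v.length = mx.length) :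
    pvScanUpper v sm mx = decide (pvSel v sm ≤ pvSel mx sm) := by
  induction v generalizing sm mx with
  | nil =>
    cases sm with
    | nil => cases mx with
      | nil => simp [pvScanUpper, pvSel]
      | cons c mx => simp at h2
    | cons m sm => simp at h1
  | cons a v ih =>
    cases sm with
    | nil => simp at h1
    | cons m sm =>
      cases mx with
      | nil => simp at h2
      | cons c mx =>
        simp only [List.length_cons, Nat.add_right_cancel_iff] at h1 h2
        by_cases hm : m = '*'
        · simp [pvScanUpper, pvSel, hm, ih _ _ h1 h2]
        · by_cases hac : a = c
          · simp [pvScanUpper, pvSel, hm, hac, ih _ _ h1 h2, pvConsLeConsIff]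
          · simp [pvScanUpper, pvSel, hm, hac, pvConsLeConsIff]

-- ===== VERDICT (by name: the statement is the Claim_ definition above) =====
theorem vin_in_range_spec : Claim_equal_vin_in_range := by
  intro vin sn_min sn_max _
  unfold Spec_vin_in_range vin_in_range vin_in_range_alt
  cases sn_min with
  | none => rfl
  | some s0 =>
    simp only []
    split
    · rfl
    · set smin := PySem.Chars.rstrip (pvRstripDash (PySem.Chars.rstrip s0.toList)) with hsmin
      by_cases hlen : vin.toList.length = smin.length
      · rw [pvMaskedJoin_eq_sel _ _ hlen, pvMaskedJoin_eq_sel smin smin rfl,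
            pvScanLower_eq _ _ hlen]
        simp only [hlen, ne_eq, not_true_eq_false, if_false]
        cases sn_max with
        | none => simp
        | some t0 =>
          simp only []
          by_cases hlen2 : vin.toList.length = t0.toList.length
          · rw [pvMaskedJoinG_eq t0.toList _ (by simpa using (hlen2.symm.trans hlen)),
                pvMaskedJoin_eq_sel t0.toList smin (hlen2.symm.trans hlen),
                pvScanUpper_eq _ _ _ hlen hlen2]
            by_cases ht0 : t0 = "" <;> simp [ht0]
          · have h3 : ¬(smin.length = t0.length) := fun e => hlen2 (by simp [hlen, e])
            by_cases ht0 : t0 = "" <;> simp [ht0, h3]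
      · have h4 : ¬(vin.length = smin.length) := by simpa using hlen
        simp [h4]
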